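-- pv_equiv track=rewrite | github.com/TheJDen/paris-hackathon-2026-inference | engine/runtime/spec_decode.py | ngram_lookup
-- ===== SOURCE A (Python) =====
-- def ngram_lookup(
--     tokens: list[int],
--     query: tuple[int, ...],
--     max_proposals: int,
-- ) -> list[int]:
--     """Search `tokens` for the last occurrence of `query` k-gram.
--
--     Scans backward from the second-to-last position (the last K-gram at the
--     tail IS the query itself; we want the occurrence before it).  Returns the
--     `max_proposals` tokens that immediately followed that occurrence, or an
--     empty list if not found.
--
--     Args:
--         tokens:         Full token history including the most recent K tokens.
--         query:          The K-gram to search for (tuple of ints).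
--         max_proposals:  Maximum number of draft tokens to return (N).
--
--     Returns:
--         List of draft token ids (possibly empty).
--     """
--     K = len(query)
--     L = len(tokens)
--     if L < K + 1:
--         # Not enough history to have a prior occurrence + at least one follow.
--         return []
--
--     # Scan backward, excluding the final K positions (those form the query).
--     # We want the rightmost match so that the follow-on tokens are most recent.
--     for i in range(L - K - 1, -1, -1):
--         if tuple(tokens[i : i + K]) == query:
--             # Found.  Return up to max_proposals tokens starting at i+K.
--             start = i + K
--             end = min(start + max_proposals, L)
--             return list(tokens[start:end])
--
--     return []
-- ===== SOURCE B (Python) =====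
-- def ngram_lookup(
--     tokens: list[int],
--     query: tuple[int, ...],
--     max_proposals: int,
-- ) -> list[int]:
--     """Rabin-Karp: single forward pass with a rolling hash (mod 2^61-1),
--     keeping the rightmost verified occurrence of the query k-gram among
--     window starts 0..L-K-1, then slice the following tokens.  Compares a
--     full K-length window only on a hash hit instead of at every position."""
--     K = len(query)
--     L = len(tokens)
--     if L < K + 1:
--         return []
--     if K == 0:
--         start = L - 1
--         return tokens[start:min(start + max_proposals, L)]
--     M = (1 << 61) - 1
--     B = 1000003
--     hq = 0
--     for t in query:
--         hq = (hq * B + t) % M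
--     pw = pow(B, K - 1, M)
--     h = 0
--     for t in tokens[:K]:
--         h = (h * B + t) % M
--     n = L - K - 1
--     best = -1
--     for i in range(n):
--         if h == hq and tuple(tokens[i:i + K]) == query:
--             best = i
--         h = ((h - tokens[i] * pw) * B + tokens[i + K]) % M
--     if h == hq and tuple(tokens[n:n + K]) == query:
--         best = n
--     if best < 0:
--         return []
--     start = best + K
--     return tokens[start:min(start + max_proposals, L)]
-- ===== Notes on version B (the rewrite author's own statement) =====
-- stated objective: alternative
-- what changed: Replaces A's backward scan that slices and compares a K-length window at every position with a single forward Rabin-Karp pass (rolling hash mod 2^61-1) that verifies only hash hits and keeps the rightmost verified occurrence.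
import Mathlib
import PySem

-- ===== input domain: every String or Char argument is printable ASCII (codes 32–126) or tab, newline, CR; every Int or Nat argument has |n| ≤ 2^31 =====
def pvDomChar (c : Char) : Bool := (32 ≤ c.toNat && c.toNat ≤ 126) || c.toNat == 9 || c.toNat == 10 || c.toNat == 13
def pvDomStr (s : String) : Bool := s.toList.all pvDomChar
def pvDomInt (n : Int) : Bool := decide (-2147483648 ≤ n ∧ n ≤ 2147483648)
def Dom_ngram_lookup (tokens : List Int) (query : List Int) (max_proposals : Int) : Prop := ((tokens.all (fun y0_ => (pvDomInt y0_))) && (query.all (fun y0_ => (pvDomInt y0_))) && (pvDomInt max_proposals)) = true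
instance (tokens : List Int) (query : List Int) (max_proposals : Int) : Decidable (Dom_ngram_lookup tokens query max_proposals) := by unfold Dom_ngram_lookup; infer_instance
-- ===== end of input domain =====

-- B replaces A's backward rescan-per-position search with a single forward
-- Rabin-Karp pass (rolling hash mod 2^61-1, matches verified), keeping the
-- rightmost verified occurrence; a different algorithm of comparable cost.


-- ===== PORT A =====
-- the backward `for i in range(L-K-1, -1, -1)` loop with its early return
def ngramA_loop (tokens query : List Int) (max_proposals : Int) : List Int → List Int
  | [] => []
  | i :: rest =>
    if PySem.List.slice tokens (some i) (some (i + (query.length : Int))) = query then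
      PySem.List.slice tokens (some (i + (query.length : Int)))
        (some (min (i + (query.length : Int) + max_proposals) (tokens.length : Int)))
    else ngramA_loop tokens query max_proposals rest

def ngram_lookup (tokens : List Int) (query : List Int) (max_proposals : Int) : List Int :=
  let K := query.length
  let L := tokens.length
  if L < K + 1 then []
  else ngramA_loop tokens query max_proposals
         (PySem.List.pyRange ((L : Int) - (K : Int) - 1) (-1) (-1))

-- ===== PORT B =====
-- rolling-hash constants: modulus 2^61 - 1 = 2305843009213693951, base 1000003
def bHash (xs : List Int) : Int :=
  xs.foldl (fun h t => PySem.Int.mod (h * 1000003 + t) 2305843009213693951) 0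

def ngram_lookup_alt (tokens : List Int) (query : List Int) (max_proposals : Int) : List Int :=
  let K := query.length
  let L := tokens.length
  if L < K + 1 then []
  else if K = 0 then
    PySem.List.slice tokens (some ((L : Int) - 1))
      (some (min ((L : Int) - 1 + max_proposals) (L : Int)))
  else
    let hq := bHash query
    let pw := PySem.Int.powMod 1000003 (K - 1) 2305843009213693951
    let h0 := bHash (PySem.List.slice tokens none (some (K : Int)))
    let n : Nat := L - K - 1
    let st := (PySem.List.pyRange 0 (n : Int) 1).foldl
      (fun (st : Int × Int) i =>
        (PySem.Int.mod ((st.1 - PySem.List.pyGetD tokens i 0 * pw) * 1000003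
            + PySem.List.pyGetD tokens (i + (K : Int)) 0) 2305843009213693951,
         if st.1 = hq ∧ PySem.List.slice tokens (some i) (some (i + (K : Int))) = query then i else st.2))
      (h0, -1)
    let best :=
      if st.1 = hq ∧ PySem.List.slice tokens (some (n : Int)) (some ((n : Int) + (K : Int))) = query
      then (n : Int) else st.2
    if best < 0 then []
    else
      PySem.List.slice tokens (some (best + (K : Int)))
        (some (min (best + (K : Int) + max_proposals) (L : Int)))

-- ===== PRECONDITION & SPEC =====
def Spec_ngram_lookup (tokens : List Int) (query : List Int) (max_proposals : Int) (out : List Int) : Prop := out = ngram_lookup_alt tokens query max_proposals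
instance (tokens : List Int) (query : List Int) (max_proposals : Int) (out : List Int) : Decidable (Spec_ngram_lookup tokens query max_proposals out) := by unfold Spec_ngram_lookup; infer_instance

-- ===== CLAIM (what is proved, stated in full; the proofs are below) =====
def Claim_equal_ngram_lookup : Prop := ∀ (tokens : List Int) (query : List Int) (max_proposals : Int), Dom_ngram_lookup tokens query max_proposals → Spec_ngram_lookup tokens query max_proposals (ngram_lookup tokens query max_proposals)

-- ===== LEMMAS AND PROOFS =====

-- rightmost match among window starts < m, as both ports compute it (-1 = none yet)
def specBest (tokens query : List Int) : Nat → Int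
  | 0 => -1
  | m + 1 => if (tokens.drop m).take query.length = query then (m : Int) else specBest tokens query m

-- the common result expression both ports emit from a best index
def resOf (tokens query : List Int) (max_proposals b : Int) : List Int :=
  if b < 0 then []
  else PySem.List.slice tokens (some (b + (query.length : Int)))
         (some (min (b + (query.length : Int) + max_proposals) (tokens.length : Int)))

-- the plain polynomial-evaluation fold (no modulus)
def polyH (xs : List Int) : Int := xs.foldl (fun h t => h * 1000003 + t) 0

theorem bHash_eq_foldl_emod (xs : List Int) (a : Int) :
    xs.foldl (fun h t => PySem.Int.mod (h * 1000003 + t) 2305843009213693951) a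
      = xs.foldl (fun h t => (h * 1000003 + t) % 2305843009213693951) a := by
  have hf : (fun (h t : Int) => PySem.Int.mod (h * 1000003 + t) 2305843009213693951)
      = fun (h t : Int) => (h * 1000003 + t) % 2305843009213693951 := by
    funext h t; exact PySem.Int.mod_eq_emod_of_pos (by norm_num)
  rw [hf]

theorem foldl_emod_congr (xs : List Int) (a b : Int)
    (hab : a % 2305843009213693951 = b % 2305843009213693951) :
    (xs.foldl (fun h t => (h * 1000003 + t) % 2305843009213693951) a) % 2305843009213693951
      = (xs.foldl (fun h t => h * 1000003 + t) b) % 2305843009213693951 := by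
  induction xs generalizing a b with
  | nil => exact hab
  | cons x xs ih =>
    simp only [List.foldl_cons]
    apply ih
    rw [Int.emod_emod_of_dvd _ dvd_rfl, Int.add_emod, Int.mul_emod, hab,
        ← Int.mul_emod, ← Int.add_emod]

theorem foldl_emod_bounds (xs : List Int) (a : Int)
    (h0 : 0 ≤ a) (h1 : a < 2305843009213693951) :
    0 ≤ xs.foldl (fun h t => (h * 1000003 + t) % 2305843009213693951) a
      ∧ xs.foldl (fun h t => (h * 1000003 + t) % 2305843009213693951) a < 2305843009213693951 := by
  induction xs generalizing a with
  | nil => exact ⟨h0, h1⟩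
  | cons x xs ih =>
    simp only [List.foldl_cons]
    exact ih _ (Int.emod_nonneg _ (by norm_num)) (Int.emod_lt_of_pos _ (by norm_num))

theorem bHash_bounds (xs : List Int) : 0 ≤ bHash xs ∧ bHash xs < 2305843009213693951 := by
  rw [bHash, bHash_eq_foldl_emod]
  exact foldl_emod_bounds xs 0 (by norm_num) (by norm_num)

theorem bHash_eq_polyH_emod (xs : List Int) :
    bHash xs = polyH xs % 2305843009213693951 := by
  have hb := bHash_bounds xs
  have h := foldl_emod_congr xs 0 0 rfl
  rw [bHash, bHash_eq_foldl_emod] at hb ⊢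
  rw [polyH, ← h, Int.emod_eq_of_lt hb.1 hb.2]

theorem polyH_foldl_init (xs : List Int) (a : Int) :
    xs.foldl (fun h t => h * 1000003 + t) a = a * 1000003 ^ xs.length + polyH xs := by
  induction xs generalizing a with
  | nil => simp [polyH]
  | cons x xs ih =>
    simp only [List.foldl_cons, List.length_cons]
    have hx : polyH (x :: xs) = (0 * 1000003 + x) * 1000003 ^ xs.length + polyH xs := by
      rw [polyH, List.foldl_cons]; exact ih _
    rw [ih (a * 1000003 + x), hx]
    ring

theorem polyH_cons (x : Int) (xs : List Int) :
    polyH (x :: xs) = x * 1000003 ^ xs.length + polyH xs := by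
  rw [polyH, List.foldl_cons, polyH_foldl_init]; ring

theorem polyH_append_singleton (xs : List Int) (y : Int) :
    polyH (xs ++ [y]) = polyH xs * 1000003 + y := by
  rw [polyH, List.foldl_append, List.foldl_cons, List.foldl_nil, polyH]

-- rolling-hash step: one forward slide of the window
theorem roll_step (tokens query : List Int) (m : Nat)
    (hK : 1 ≤ query.length) (hL : m + 1 + query.length ≤ tokens.length) :
    PySem.Int.mod ((bHash ((tokens.drop m).take query.length)
        - PySem.List.pyGetD tokens (m : Int) 0
            * PySem.Int.powMod 1000003 (query.length - 1) 2305843009213693951) * 1000003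
        + PySem.List.pyGetD tokens ((m : Int) + (query.length : Int)) 0) 2305843009213693951
      = bHash ((tokens.drop (m + 1)).take query.length) := by
  have hm : m < tokens.length := by omega
  have hmK : m + query.length < tokens.length := by omega
  obtain ⟨K', hK'⟩ : ∃ K', query.length = K' + 1 := ⟨query.length - 1, by omega⟩
  set K := query.length with hKdef
  set MM : Int := 2305843009213693951 with hMM
  -- indices
  have hget1 : PySem.List.pyGetD tokens (m : Int) 0 = tokens[m] := by
    rw [PySem.List.pyGetD_natCast]; exact List.getD_eq_getElem _ _ hm
  have hget2 : PySem.List.pyGetD tokens ((m : Int) + (K : Int)) 0 = tokens[m + K] := by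
    rw [show ((m : Int) + (K : Int)) = ((m + K : Nat) : Int) by push_cast; ring,
        PySem.List.pyGetD_natCast]
    exact List.getD_eq_getElem _ _ hmK
  -- window decompositions
  have hdrop : tokens.drop m = tokens[m] :: tokens.drop (m + 1) :=
    List.drop_eq_getElem_cons hm
  have hw1 : (tokens.drop m).take K = tokens[m] :: (tokens.drop (m + 1)).take K' := by
    conv_lhs => rw [hdrop, hK', List.take_succ_cons]
  have hmidlen : ((tokens.drop (m + 1)).take K').length = K' := by
    simp only [List.length_take, List.length_drop]; omega
  have hget : (tokens.drop (m + 1))[K']? = some tokens[m + K] := by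
    rw [List.getElem?_drop, show m + 1 + K' = m + K by omega]
    exact List.getElem?_eq_getElem hmK
  have hw2 : (tokens.drop (m + 1)).take K
      = (tokens.drop (m + 1)).take K' ++ [tokens[m + K]] := by
    conv_lhs => rw [hK']
    rw [List.take_add_one, hget]
    rfl
  -- modular congruences
  have hMpos : (0 : Int) < MM := by norm_num [hMM]
  have hpw : PySem.Int.powMod 1000003 (K - 1) MM = (1000003 : Int) ^ (K - 1) % MM :=
    PySem.Int.powMod_eq_emod _ _ hMpos
  have c1 : Int.ModEq MM (bHash ((tokens.drop m).take K)) (polyH ((tokens.drop m).take K)) := by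
    show _ % MM = _ % MM
    rw [bHash_eq_polyH_emod, Int.emod_emod_of_dvd _ dvd_rfl]
  have c2 : Int.ModEq MM (PySem.Int.powMod 1000003 (K - 1) MM) ((1000003 : Int) ^ (K - 1)) := by
    show _ % MM = _ % MM
    rw [hpw, Int.emod_emod_of_dvd _ dvd_rfl]
  have comb : Int.ModEq MM
      ((bHash ((tokens.drop m).take K) - tokens[m] * PySem.Int.powMod 1000003 (K - 1) MM) * 1000003
        + tokens[m + K])
      ((polyH ((tokens.drop m).take K) - tokens[m] * (1000003 : Int) ^ (K - 1)) * 1000003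
        + tokens[m + K]) :=
    (((c1.sub (c2.mul_left tokens[m])).mul_right 1000003).add_right _)
  have hpoly : (polyH ((tokens.drop m).take K) - tokens[m] * (1000003 : Int) ^ (K - 1)) * 1000003
      + tokens[m + K] = polyH ((tokens.drop (m + 1)).take K) := by
    rw [hw1, polyH_cons, hmidlen, hw2, polyH_append_singleton, show K - 1 = K' by omega]
    ring
  rw [PySem.Int.mod_eq_emod_of_pos hMpos, hget1, hget2]
  calc ((bHash ((tokens.drop m).take K) - tokens[m] * PySem.Int.powMod 1000003 (K - 1) MM) * 1000003
        + tokens[m + K]) % MM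
      = ((polyH ((tokens.drop m).take K) - tokens[m] * (1000003 : Int) ^ (K - 1)) * 1000003
        + tokens[m + K]) % MM := comb
    _ = polyH ((tokens.drop (m + 1)).take K) % MM := by rw [hpoly]
    _ = bHash ((tokens.drop (m + 1)).take K) := (bHash_eq_polyH_emod _).symm

-- A's backward loop over [m, …, 0] returns the rightmost match below m+1
theorem loopA_eq (tokens query : List Int) (mp : Int) (m : Nat) :
    ngramA_loop tokens query mp (PySem.List.pyRange (m : Int) (-1) (-1))
      = resOf tokens query mp (specBest tokens query (m + 1)) := by
  induction m with
  | zero =>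
    rw [PySem.List.pyRange_neg_one_cons (by norm_num),
        PySem.List.pyRange_neg_one_eq_nil (by norm_num)]
    rw [ngramA_loop, PySem.List.slice_natCast_add]
    rw [show specBest tokens query (0 + 1)
        = if (tokens.drop 0).take query.length = query then ((0:Nat) : Int)
          else specBest tokens query 0 from rfl]
    split_ifs with h
    · rw [resOf, if_neg (by norm_num)]
    · rw [ngramA_loop]
      simp [specBest, resOf]
  | succ m ih =>
    rw [PySem.List.pyRange_neg_one_cons (by omega),
        show (((m+1:Nat)) : Int) - 1 = (m : Int) by push_cast; ring]
    rw [ngramA_loop, PySem.List.slice_natCast_add]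
    rw [show specBest tokens query (m + 1 + 1)
        = if (tokens.drop (m + 1)).take query.length = query then ((m + 1 : Nat) : Int)
          else specBest tokens query (m + 1) from rfl]
    split_ifs with h
    · rw [resOf, if_neg (by omega)]
    · exact ih

-- B's forward fold invariant: hash of the current window + rightmost match so far
theorem foldB_inv (tokens query : List Int) (hK : 1 ≤ query.length) (n : Nat)
    (hnL : n + query.length < tokens.length) (m : Nat) (hm : m ≤ n) :
    (PySem.List.pyRange 0 (m : Int) 1).foldl
      (fun (st : Int × Int) i =>
        (PySem.Int.mod ((st.1 - PySem.List.pyGetD tokens i 0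
              * PySem.Int.powMod 1000003 (query.length - 1) 2305843009213693951) * 1000003
            + PySem.List.pyGetD tokens (i + (query.length : Int)) 0) 2305843009213693951,
         if st.1 = bHash query
            ∧ PySem.List.slice tokens (some i) (some (i + (query.length : Int))) = query
         then i else st.2))
      (bHash (PySem.List.slice tokens none (some (query.length : Int))), -1)
      = (bHash ((tokens.drop m).take query.length), specBest tokens query m) := by
  induction m with
  | zero =>
    rw [PySem.List.pyRange_one_eq_nil (by norm_num), List.foldl_nil]
    rw [PySem.List.slice_to_natCast]
    simp [specBest]
  | succ m ih =>
    have hm' : m ≤ n := by omega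
    rw [show ((m + 1 : Nat) : Int) = (m : Int) + 1 by push_cast; ring,
        PySem.List.pyRange_one_succ_right (by positivity), List.foldl_append,
        ih hm', List.foldl_cons, List.foldl_nil]
    dsimp only
    rw [Prod.mk.injEq]
    refine ⟨roll_step tokens query m hK (by omega), ?_⟩
    rw [PySem.List.slice_natCast_add]
    rw [show specBest tokens query (m + 1)
        = if (tokens.drop m).take query.length = query then ((m : Nat) : Int)
          else specBest tokens query m from rfl]
    by_cases hq : (tokens.drop m).take query.length = query
    · rw [if_pos ⟨by rw [hq], hq⟩, if_pos hq]
    · rw [if_neg (fun hc => hq hc.2), if_neg hq]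

theorem ngram_lookup_spec : Claim_equal_ngram_lookup := by
  intro tokens query mp _
  show ngram_lookup tokens query mp = ngram_lookup_alt tokens query mp
  simp only [ngram_lookup, ngram_lookup_alt]
  by_cases hL : tokens.length < query.length + 1
  · rw [if_pos hL, if_pos hL]
  · rw [if_neg hL, if_neg hL]
    have hL' : query.length + 1 ≤ tokens.length := by omega
    have hcast : (tokens.length : Int) - (query.length : Int) - 1
        = ((tokens.length - query.length - 1 : Nat) : Int) := by omega
    rw [hcast, loopA_eq]
    by_cases hK0 : query.length = 0
    · rw [if_pos hK0]
      have hqnil : query = [] := List.length_eq_zero_iff.mp hK0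
      have hcond : (tokens.drop (tokens.length - query.length - 1)).take query.length = query := by
        rw [hK0, List.take_zero, hqnil]
      rw [show specBest tokens query (tokens.length - query.length - 1 + 1)
          = if (tokens.drop (tokens.length - query.length - 1)).take query.length = query
            then ((tokens.length - query.length - 1 : Nat) : Int)
            else specBest tokens query (tokens.length - query.length - 1) from rfl,
          if_pos hcond]
      rw [resOf, if_neg (by omega)]
      have h1 : ((tokens.length - query.length - 1 : Nat) : Int) + (query.length : Int)
          = (tokens.length : Int) - 1 := by omega
      rw [h1]
    · rw [if_neg hK0]
      rw [foldB_inv tokens query (by omega) (tokens.length - query.length - 1) (by omega)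
            (tokens.length - query.length - 1) le_rfl]
      dsimp only
      rw [PySem.List.slice_natCast_add]
      have hbest :
          (if bHash ((tokens.drop (tokens.length - query.length - 1)).take query.length) = bHash query
              ∧ (tokens.drop (tokens.length - query.length - 1)).take query.length = query
           then ((tokens.length - query.length - 1 : Nat) : Int)
           else specBest tokens query (tokens.length - query.length - 1))
          = specBest tokens query (tokens.length - query.length - 1 + 1) := by
        rw [show specBest tokens query (tokens.length - query.length - 1 + 1)
            = if (tokens.drop (tokens.length - query.length - 1)).take query.length = query
              then ((tokens.length - query.length - 1 : Nat) : Int)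
              else specBest tokens query (tokens.length - query.length - 1) from rfl]
        by_cases hq : (tokens.drop (tokens.length - query.length - 1)).take query.length = query
        · rw [if_pos ⟨by rw [hq], hq⟩, if_pos hq]
        · rw [if_neg (fun hc => hq hc.2), if_neg hq]
      rw [hbest, resOf]
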